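-- pv_equiv track=rewrite | github.com/probabl-ai/skore | skore/src/skore/sklearn/_comparison/report.py | _deduplicate_report_names
-- ===== SOURCE A (Python) =====
-- from collections import Counter
--
-- def _deduplicate_report_names(report_names: list[str]) -> list[str]:
--     """De-duplicate report names that appear several times.
--
--     Leave the other report names alone.
--
--     Parameters
--     ----------
--     report_names : list of str
--         The list of report names to be checked.
--
--     Returns
--     -------
--     list of str
--         The de-duplicated list of report names.
--
--     Examples
--     --------
--     >>> _deduplicate_report_names(['a', 'b'])
--     ['a', 'b']
--     >>> _deduplicate_report_names(['a', 'a'])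
--     ['a_1', 'a_2']
--     >>> _deduplicate_report_names(['a', 'b', 'a'])
--     ['a_1', 'b', 'a_2']
--     >>> _deduplicate_report_names(['a', 'b', 'a', 'b'])
--     ['a_1', 'b_1', 'a_2', 'b_2']
--     >>> _deduplicate_report_names([])
--     []
--     >>> _deduplicate_report_names(['a'])
--     ['a']
--     """
--     counts = Counter(report_names)
--     if len(report_names) == len(counts):
--         return report_names
--
--     names = report_names.copy()
--     seen: Counter = Counter()
--     for i in range(len(names)):
--         name = names[i]
--         seen[name] += 1
--         if counts[name] > 1:
--             names[i] = f"{name}_{seen[name]}"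
--     return names
-- ===== SOURCE B (Python) =====
-- from collections import defaultdict
--
--
-- def _deduplicate_report_names(report_names: list[str]) -> list[str]:
--     """De-duplicate report names: group positions by name, rename duplicate groups."""
--     groups = defaultdict(list)
--     for i, name in enumerate(report_names):
--         groups[name].append(i)
--     result = list(report_names)
--     for name, idxs in groups.items():
--         if len(idxs) > 1:
--             for j, idx in enumerate(idxs):
--                 result[idx] = f"{name}_{j + 1}"
--     return result
-- ===== Notes on version B (the rewrite author's own statement) =====
-- stated objective: alternative
-- what changed: Replaced A's single forward pass with a running seen-Counter by a two-stage grouping algorithm: build a dict mapping each name to the list of positions where it occurs, then rename each duplicate group in one sweep per group using the position within its index list.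
import Mathlib
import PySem

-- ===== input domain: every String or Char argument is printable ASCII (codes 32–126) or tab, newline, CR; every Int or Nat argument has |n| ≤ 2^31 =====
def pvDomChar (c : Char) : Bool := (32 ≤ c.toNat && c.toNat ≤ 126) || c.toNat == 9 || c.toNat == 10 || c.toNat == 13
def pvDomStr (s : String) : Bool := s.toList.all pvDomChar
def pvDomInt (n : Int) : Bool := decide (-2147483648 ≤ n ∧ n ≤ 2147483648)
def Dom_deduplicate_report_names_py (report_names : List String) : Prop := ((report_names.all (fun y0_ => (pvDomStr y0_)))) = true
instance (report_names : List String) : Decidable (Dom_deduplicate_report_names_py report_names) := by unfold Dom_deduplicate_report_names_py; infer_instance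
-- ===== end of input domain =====

-- B replaces A's single forward pass with a running seen-Counter by a two-stage grouping
-- algorithm: a dict from name to its list of positions, then one renaming sweep per duplicate
-- group (alternative decomposition, same asymptotic cost).
-- ===== PORT A =====
def deduplicate_report_names_py (report_names : List String) : List String :=
  let counts := PySem.Dict.counter report_names
  if report_names.length == counts.size then report_names
  else
    ((PySem.List.pyRange 0 (report_names.length : Int) 1).foldl
      (fun (st : List String × PySem.Dict String Int) i =>
        let name := PySem.List.pyGetD st.1 i ""
        let seen := st.2.modify name 0 (· + 1)
        if 1 < counts.getD name 0 then
          (PySem.List.pySetD st.1 i (name ++ "_" ++ PySem.Int.toStr (seen.getD name 0)), seen)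
        else (st.1, seen))
      (report_names, PySem.Dict.empty)).1

-- ===== PORT B =====
def deduplicate_report_names_py_alt (report_names : List String) : List String :=
  let groups : PySem.Dict String (List Int) :=
    (PySem.List.enumerate report_names).foldl
      (fun d p => d.modify p.2 [] (fun l => l ++ [p.1])) PySem.Dict.empty
  groups.items.foldl
    (fun res g =>
      if 1 < g.2.length then
        (PySem.List.enumerate g.2).foldl
          (fun r p => PySem.List.pySetD r p.2 (g.1 ++ "_" ++ PySem.Int.toStr (p.1 + 1))) res
      else res)
    report_names

-- ===== PRECONDITION & SPEC =====
def Spec_deduplicate_report_names_py (report_names : List String) (out : List String) : Prop := out = deduplicate_report_names_py_alt report_names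
instance (report_names : List String) (out : List String) : Decidable (Spec_deduplicate_report_names_py report_names out) := by unfold Spec_deduplicate_report_names_py; infer_instance

-- ===== CLAIM (what is proved, stated in full; the proofs are below) =====
def Claim_equal_deduplicate_report_names_py : Prop := ∀ (report_names : List String), Dom_deduplicate_report_names_py report_names → Spec_deduplicate_report_names_py report_names (deduplicate_report_names_py report_names)

-- ===== LEMMAS AND PROOFS =====
-- the value both programs put at position k
def pvOutAt (xs : List String) (k : Nat) : String :=
  if List.count (xs.getD k "") xs = 1 then xs.getD k ""
  else xs.getD k "" ++ "_" ++ PySem.Int.toStr ((List.count (xs.getD k "") (xs.take (k+1)) : Nat) : Int)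

-- the positions at which `name` occurs in xs (B's index group, as Nats)
def pvNidx (xs : List String) (name : String) : List Nat :=
  (List.range xs.length).filter (fun t => xs.getD t "" == name)

lemma pvCnt (xs : List String) (name : String) :
    ∀ i, i ≤ xs.length →
      ((List.range i).filter (fun t => xs.getD t "" == name)).length
        = List.count name (xs.take i) := by
  intro i
  induction i with
  | zero => simp
  | succ i ih =>
    intro hle
    have hi : i < xs.length := by omega
    rw [List.range_succ, List.filter_append, List.length_append,
      List.take_succ_eq_append_getElem hi, List.count_append, ih (by omega)]
    have hgi : xs[i]?.getD "" = xs[i] := by simp [List.getElem?_eq_getElem hi]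
    by_cases h : xs[i] = name
    · simp [List.getD, hgi, h]
    · simp [List.getD, hgi, h]

lemma pvIdxOf (xs : List String) (name : String) (k : Nat) (hk : k < xs.length)
    (hname : xs.getD k "" = name) :
    (pvNidx xs name).idxOf k = List.count name (xs.take k) := by
  have hsplit : List.range xs.length
      = List.range k ++ (List.range (xs.length - k)).map (k + ·) := by
    conv_lhs => rw [show xs.length = k + (xs.length - k) by omega]
    rw [List.range_add]
  have hpos : 0 < xs.length - k := by omega
  have hname' : xs[k]?.getD "" = name := by simpa [List.getD] using hname
  have hrest : List.range (xs.length - k) = 0 :: (List.range (xs.length - k - 1)).map (· + 1) := by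
    rw [show xs.length - k = (xs.length - k - 1) + 1 by omega, List.range_succ_eq_map]
    rfl
  rw [pvNidx, hsplit, List.filter_append]
  have hknot : k ∉ (List.range k).filter (fun t => xs.getD t "" == name) := by
    intro hmem
    have := List.mem_range.mp (List.mem_filter.mp hmem).1
    omega
  rw [List.idxOf_append_of_notMem hknot]
  have hhead : ((List.range (xs.length - k)).map (k + ·)).filter (fun t => xs.getD t "" == name)
      = k :: (((List.range (xs.length - k - 1)).map (· + 1)).map (k + ·)).filter
          (fun t => xs.getD t "" == name) := by
    rw [hrest, List.map_cons, List.filter_cons]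
    simp [List.getD, hname']
  rw [hhead, List.idxOf_cons_self, pvCnt xs name k (by omega)]
  omega

lemma pvInnerLen (name : String) :
    ∀ (js : List Int) (s : Int) (res : List String),
      ((PySem.List.enumerate js s).foldl
        (fun r p => PySem.List.pySetD r p.2 (name ++ "_" ++ PySem.Int.toStr (p.1 + 1))) res).length
      = res.length := by
  intro js
  induction js with
  | nil => intro s res; simp [PySem.List.enumerate]
  | cons j js ih =>
    intro s res
    rw [PySem.List.enumerate_cons, List.foldl_cons, ih]
    simp [PySem.List.length_pySetD]

lemma pvInnerGet (name : String) :
    ∀ (js : List Nat) (s : Int) (res : List String) (k : Nat),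
      js.Nodup → (∀ t ∈ js, t < res.length) →
      ((PySem.List.enumerate (js.map (Nat.cast : Nat → Int)) s).foldl
          (fun r p => PySem.List.pySetD r p.2 (name ++ "_" ++ PySem.Int.toStr (p.1 + 1))) res)[k]?
        = if k ∈ js then some (name ++ "_" ++ PySem.Int.toStr (s + (js.idxOf k) + 1))
          else res[k]? := by
  intro js
  induction js with
  | nil => intro s res k _ _; simp
  | cons j js ih =>
    intro s res k hnd hlt
    rw [List.map_cons, PySem.List.enumerate_cons, List.foldl_cons]
    have hjlt : j < res.length := hlt j (by simp)
    have hset : PySem.List.pySetD res ((j : Nat) : Int) (name ++ "_" ++ PySem.Int.toStr (s + 1))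
        = res.set j (name ++ "_" ++ PySem.Int.toStr (s + 1)) := by
      simp [PySem.List.pySetD_natCast]
    rw [hset, ih (s + 1) _ k (List.nodup_cons.mp hnd).2
      (fun t ht => by rw [List.length_set]; exact hlt t (by simp [ht]))]
    rcases List.nodup_cons.mp hnd with ⟨hjnot, _⟩
    by_cases hkj : k = j
    · subst hkj
      rw [if_neg hjnot, if_pos (by simp), List.getElem?_set_self (by omega),
        List.idxOf_cons_self]
      norm_num
    · by_cases hkin : k ∈ js
      · rw [if_pos hkin, if_pos (by simp [hkin]),
          List.idxOf_cons_ne _ (by omega)]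
        congr 2
        push_cast
        ring_nf
      · rw [if_neg hkin, if_neg (by simp [hkin, hkj]), List.getElem?_set_ne (by omega)]

lemma pvOuterLen (xs : List String) :
    ∀ (ns : List String) (res : List String),
      (ns.foldl (fun res name =>
          if 1 < ((pvNidx xs name).map (Nat.cast : Nat → Int)).length then
            (PySem.List.enumerate ((pvNidx xs name).map (Nat.cast : Nat → Int)) 0).foldl
              (fun r p => PySem.List.pySetD r p.2 (name ++ "_" ++ PySem.Int.toStr (p.1 + 1))) res
          else res) res).length = res.length := by
  intro ns
  induction ns with
  | nil => intro res; rfl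
  | cons nm ns ih =>
    intro res
    rw [List.foldl_cons, ih]
    by_cases h : 1 < ((pvNidx xs nm).map (Nat.cast : Nat → Int)).length
    · rw [if_pos h, pvInnerLen]
    · rw [if_neg h]

lemma pvCount_take_succ (xs : List String) (k : Nat) (hk : k < xs.length) :
    List.count xs[k] (xs.take (k+1)) = List.count xs[k] (xs.take k) + 1 := by
  rw [List.take_succ_eq_append_getElem hk, List.count_append]
  simp

lemma pvOuterGet (xs : List String) :
    ∀ (ns : List String) (res : List String),
      res.length = xs.length → (∀ nm ∈ ns, nm ∈ xs) →
      ∀ (k : Nat) (hk : k < xs.length),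
      (ns.foldl (fun res name =>
          if 1 < ((pvNidx xs name).map (Nat.cast : Nat → Int)).length then
            (PySem.List.enumerate ((pvNidx xs name).map (Nat.cast : Nat → Int)) 0).foldl
              (fun r p => PySem.List.pySetD r p.2 (name ++ "_" ++ PySem.Int.toStr (p.1 + 1))) res
          else res) res)[k]?
        = if xs[k] ∈ ns ∧ 1 < List.count (xs[k]) xs then some (pvOutAt xs k) else res[k]? := by
  intro ns
  induction ns with
  | nil => intro res _ _ k hk; simp
  | cons nm ns ih =>
    intro res hlen hmem k hk
    rw [List.foldl_cons]
    have hlenG : ((pvNidx xs nm).map (Nat.cast : Nat → Int)).length = List.count nm xs := by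
      rw [List.length_map, pvNidx, pvCnt xs nm xs.length (le_refl _), List.take_length]
    have hmemN : ∀ t, t ∈ pvNidx xs nm ↔ (t < xs.length ∧ xs.getD t "" = nm) := by
      intro t
      rw [pvNidx, List.mem_filter, List.mem_range]
      simp
    have hgetk : xs.getD k "" = xs[k] := List.getD_eq_getElem _ _ hk
    by_cases hbig : 1 < ((pvNidx xs nm).map (Nat.cast : Nat → Int)).length
    · rw [if_pos hbig]
      have hcnt : 1 < List.count nm xs := by rw [← hlenG]; exact hbig
      have hres' := pvInnerGet nm (pvNidx xs nm) 0 res k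
        (List.Nodup.filter _ (List.nodup_range)) ?hbnd
      case hbnd =>
        intro t ht
        rw [hlen]
        exact ((hmemN t).mp ht).1
      rw [ih _ (by rw [pvInnerLen]; exact hlen) (fun x hx => hmem x (by simp [hx])) k hk,
        hres']
      by_cases hin' : xs[k] ∈ ns ∧ 1 < List.count (xs[k]) xs
      · rw [if_pos hin', if_pos (by exact ⟨by simp [hin'.1], hin'.2⟩)]
      · rw [if_neg hin']
        by_cases hkin : k ∈ pvNidx xs nm
        · have hknm : xs[k] = nm := by rw [← hgetk]; exact ((hmemN k).mp hkin).2
          rw [if_pos hkin, if_pos ⟨by simp [hknm], by rw [hknm]; exact hcnt⟩]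
          have hidx := pvIdxOf xs nm k hk (by rw [hgetk, hknm])
          rw [pvOutAt, hgetk, hknm, if_neg (by omega)]
          have h1 : List.count nm (xs.take (k+1)) = List.count nm (xs.take k) + 1 := by
            have := pvCount_take_succ xs k hk
            rw [hknm] at this
            exact this
          rw [h1, hidx]
          congr 2
          push_cast
          ring_nf
        · have hknm : xs[k] ≠ nm := by
            intro h
            exact hkin ((hmemN k).mpr ⟨hk, by rw [hgetk, h]⟩)
          rw [if_neg hkin, if_neg (by
            intro ⟨h1, h2⟩
            rcases List.mem_cons.mp h1 with h | h
            · exact hknm h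
            · exact hin' ⟨h, h2⟩)]
    · rw [if_neg hbig]
      have hcnt : ¬ 1 < List.count nm xs := by rw [← hlenG]; exact hbig
      rw [ih _ hlen (fun x hx => hmem x (by simp [hx])) k hk]
      by_cases hin' : xs[k] ∈ ns ∧ 1 < List.count (xs[k]) xs
      · rw [if_pos hin', if_pos ⟨by simp [hin'.1], hin'.2⟩]
      · rw [if_neg hin', if_neg (by
          intro ⟨h1, h2⟩
          rcases List.mem_cons.mp h1 with h | h
          · rw [h] at h2; exact hcnt h2
          · exact hin' ⟨h, h2⟩)]

-- B's outer data: the items of the grouping dict are the distinct names with their index groups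
lemma pvItems (xs : List String) :
    ((PySem.List.enumerate xs).foldl
      (fun d p => d.modify p.2 [] (fun l => l ++ [p.1])) PySem.Dict.empty).items
    = (PySem.Set.ofList xs).map
        (fun name => (name, (pvNidx xs name).map (Nat.cast : Nat → Int))) := by
  have hswap : (PySem.List.enumerate xs).foldl
      (fun d p => d.modify p.2 [] (fun l => l ++ [p.1])) PySem.Dict.empty
      = ((PySem.List.enumerate xs).map Prod.swap).foldl
          (fun d p => d.modify p.1 [] (fun l => l ++ [p.2])) PySem.Dict.empty := by
    rw [List.foldl_map]
    rfl
  have hpairs : (PySem.List.enumerate xs).map Prod.swap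
      = (List.range xs.length).map (fun t => (xs.getD t "", (t : Int))) := by
    rw [PySem.List.enumerate_eq_map_pyRange xs "", PySem.List.len_eq,
      PySem.List.pyRange_zero_natCast, List.map_map, List.map_map]
    apply List.map_congr_left
    intro t _
    simp [Prod.swap]
  have hkeys : ((PySem.List.enumerate xs).foldl
      (fun d p => d.modify p.2 [] (fun l => l ++ [p.1])) PySem.Dict.empty).keys
      = PySem.Set.ofList xs := by
    rw [hswap]
    have h1 := PySem.Dict.keys_foldl_modify_key ((PySem.List.enumerate xs).map Prod.swap)
      (fun p : String × Int => p.1) [] (fun _ p => (fun l => l ++ [p.2])) PySem.Dict.empty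
    simp only [] at h1
    rw [h1]
    have hmap : ((PySem.List.enumerate xs).map Prod.swap).map (fun p : String × Int => p.1)
        = (PySem.List.enumerate xs).map (·.2) := by
      rw [List.map_map]; rfl
    rw [hmap, PySem.List.map_snd_enumerate]
    rfl
  have hnd : ((PySem.List.enumerate xs).foldl
      (fun d p => d.modify p.2 [] (fun l => l ++ [p.1])) PySem.Dict.empty).keys.Nodup := by
    rw [hkeys]; exact PySem.Set.nodup_ofList xs
  have hgetD : ∀ name, ((PySem.List.enumerate xs).foldl
      (fun d p => d.modify p.2 [] (fun l => l ++ [p.1])) PySem.Dict.empty).getD name []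
      = (pvNidx xs name).map (Nat.cast : Nat → Int) := by
    intro name
    rw [hswap, PySem.Dict.getD_foldl_modify_append, PySem.Dict.getD_empty, hpairs,
      List.filter_map, List.map_map, pvNidx]
    simp [Function.comp_def]
  rw [PySem.Dict.items_eq_map_keys _ hnd [], hkeys]
  apply List.map_congr_left
  intro name _
  rw [hgetD]

lemma alt_eq (xs : List String) :
    deduplicate_report_names_py_alt xs = (List.range xs.length).map (pvOutAt xs) := by
  rw [deduplicate_report_names_py_alt]
  rw [pvItems, List.foldl_map]
  apply List.ext_getElem?
  intro k
  by_cases hk : k < xs.length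
  · have hout := pvOuterGet xs (PySem.Set.ofList xs) xs rfl
      (fun nm h => (PySem.Set.mem_ofList xs nm).mp h) k hk
    rw [hout, List.getElem?_map, List.getElem?_range hk]
    have hmem : xs[k] ∈ PySem.Set.ofList xs :=
      (PySem.Set.mem_ofList xs _).mpr (List.getElem_mem hk)
    by_cases hcnt : 1 < List.count (xs[k]) xs
    · rw [if_pos ⟨hmem, hcnt⟩]; rfl
    · have h1 : List.count (xs[k]) xs = 1 := by
        have := List.one_le_count_iff.mpr (List.getElem_mem hk)
        omega
      rw [if_neg (by intro h; exact hcnt h.2), List.getElem?_eq_getElem hk]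
      simp only [Option.map_some, pvOutAt]
      rw [List.getD_eq_getElem _ "" hk, if_pos h1]
  · rw [List.getElem?_eq_none, List.getElem?_eq_none]
    · rw [List.length_map, List.length_range]; omega
    · rw [pvOuterLen]; omega

lemma alt_of_nodup (xs : List String) (h : xs.Nodup) : deduplicate_report_names_py_alt xs = xs := by
  rw [alt_eq]
  apply List.ext_getElem
  · simp
  · intro k h1 h2
    rw [List.getElem_map, List.getElem_range]
    have hk : k < xs.length := by simpa using h2
    rw [pvOutAt, List.getD_eq_getElem _ "" hk,
      if_pos (List.count_eq_one_of_mem h (List.getElem_mem hk))]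

-- ===== A-side: the forward loop computes the same positional values =====
def pvStep (xs : List String) (st : List String × PySem.Dict String Int) (i : Int) :
    List String × PySem.Dict String Int :=
  let name := PySem.List.pyGetD st.1 i ""
  let seen := st.2.modify name 0 (· + 1)
  if 1 < (PySem.Dict.counter xs).getD name 0 then
    (PySem.List.pySetD st.1 i (name ++ "_" ++ PySem.Int.toStr (seen.getD name 0)), seen)
  else (st.1, seen)

lemma loop_inv (xs : List String) : ∀ (m k : Nat) (names : List String) (seen : PySem.Dict String Int),
    k + m = xs.length →
    names.length = xs.length →
    names.drop k = xs.drop k →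
    (∀ s, seen.getD s 0 = ((List.count s (xs.take k) : Nat) : Int)) →
    ((List.range' k m).foldl (fun st (j : Nat) => pvStep xs st (j : Int)) (names, seen)).1
      = names.take k ++ (List.range' k m).map (pvOutAt xs) := by
  intro m
  induction m with
  | zero =>
    intro k names seen hk hlen _ _
    simp [List.take_of_length_le (by omega : names.length ≤ k)]
  | succ m ih =>
    intro k names seen hk hlen hsuf hseen
    have hklt : k < xs.length := by omega
    have hkn : k < names.length := by omega
    have hname : names.getD k "" = xs[k] := by
      have h0 := congrArg (fun l => l[0]?) hsuf
      simp only [List.getElem?_drop, Nat.add_zero] at h0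
      rw [List.getD_eq_getElem _ _ hkn]
      rw [List.getElem?_eq_getElem hkn, List.getElem?_eq_getElem hklt] at h0
      simpa using h0
    have htake : xs.take (k+1) = xs.take k ++ [xs[k]] := List.take_succ_eq_append_getElem hklt
    have hcnt1 : ((List.count (xs[k]) (xs.take (k+1)) : Nat) : Int)
        = ((List.count (xs[k]) (xs.take k) : Nat) : Int) + 1 := by
      rw [htake]; push_cast [List.count_append]; simp
    have hseen' : ∀ s, ((seen.modify xs[k] 0 (· + 1)).getD s 0)
        = ((List.count s (xs.take (k+1)) : Nat) : Int) := by
      intro s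
      rw [PySem.Dict.getD_modify]
      rcases eq_or_ne s xs[k] with hs | hs
      · subst hs; simp [hseen, hcnt1]
      · rw [if_neg hs, hseen s, htake]
        push_cast [List.count_append]
        have : List.count s [xs[k]] = 0 := by
          simp [List.count_singleton]
          exact fun h => (hs h.symm).elim
        omega
    have hdrop1 : names.drop (k+1) = xs.drop (k+1) := by
      have := congrArg (List.drop 1) hsuf
      simpa [List.drop_drop, Nat.add_comm] using this
    rw [List.range'_succ, List.foldl_cons]
    by_cases hc : 1 < ((PySem.Dict.counter xs).getD xs[k] 0)
    · have hstep : pvStep xs (names, seen) ((k : Nat) : Int)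
          = (names.set k (xs[k] ++ "_" ++ PySem.Int.toStr ((seen.modify xs[k] 0 (· + 1)).getD xs[k] 0)),
             seen.modify xs[k] 0 (· + 1)) := by
        simp only [pvStep, PySem.List.pyGetD_natCast, hname, if_pos hc, PySem.List.pySetD_natCast]
      rw [hstep]
      set v := xs[k] ++ "_" ++ PySem.Int.toStr ((seen.modify xs[k] 0 (· + 1)).getD xs[k] 0) with hv
      rw [ih (k+1) (names.set k v) _ (by omega) (by simpa using hlen)
        (by rw [List.drop_set_of_lt (by omega)]; exact hdrop1) hseen']
      have hset : (names.set k v).take (k+1) = names.take k ++ [v] := by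
        rw [List.take_succ_eq_append_getElem (by simpa using hkn)]
        rw [List.take_set_of_le (Nat.le_refl k), List.getElem_set_self]
      have hcount : 1 < List.count (xs[k]) xs := by
        rw [PySem.Dict.getD_counter] at hc; exact_mod_cast hc
      have hout : pvOutAt xs k = v := by
        rw [pvOutAt, List.getD_eq_getElem _ _ hklt, if_neg (by omega), hv, hseen' xs[k], hcnt1]
      rw [hset, List.map_cons, hout, List.append_assoc]; rfl
    · have hcount : List.count (xs[k]) xs = 1 := by
        rw [PySem.Dict.getD_counter] at hc
        have hmem : xs[k] ∈ xs := List.getElem_mem hklt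
        have h1 : 1 ≤ List.count (xs[k]) xs := List.one_le_count_iff.mpr hmem
        omega
      have hstep : pvStep xs (names, seen) ((k : Nat) : Int) = (names, seen.modify xs[k] 0 (· + 1)) := by
        simp only [pvStep, PySem.List.pyGetD_natCast, hname, if_neg hc]
      rw [hstep]
      rw [ih (k+1) names _ (by omega) hlen hdrop1 hseen']
      have hnk : names[k] = xs[k] := by rw [← List.getD_eq_getElem _ "" hkn]; exact hname
      have hout : pvOutAt xs k = names[k] := by
        rw [pvOutAt, List.getD_eq_getElem _ _ hklt, if_pos hcount, hnk]
      rw [List.take_succ_eq_append_getElem hkn, List.map_cons, hout, List.append_assoc]; rfl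

lemma pv_len_le : ∀ (xs : List String) (s : PySem.Set String),
    (List.foldl PySem.Set.add s xs).length ≤ s.length + xs.length := by
  intro xs
  induction xs with
  | nil => intro s; simp
  | cons x xs ih =>
    intro s
    rw [List.foldl_cons]
    rcases Decidable.em (s.contains x = true) with h | h
    · have hx : x ∈ s := by simpa using h
      have hadd : PySem.Set.add s x = s := by simp [PySem.Set.add, hx]
      rw [hadd]; have := ih s; simp; omega
    · have hx : x ∉ s := by simpa using h
      have hadd : PySem.Set.add s x = s ++ [x] := by simp [PySem.Set.add, hx]
      rw [hadd]; have := ih (s ++ [x]); simp at this ⊢; omega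

lemma pv_nodup : ∀ (xs : List String) (s : PySem.Set String),
    (List.foldl PySem.Set.add s xs).length = s.length + xs.length → xs.Nodup ∧ ∀ x ∈ xs, x ∉ s := by
  intro xs
  induction xs with
  | nil => intro s _; simp
  | cons x xs ih =>
    intro s h
    rw [List.foldl_cons] at h
    rcases Decidable.em (s.contains x = true) with hc | hc
    · exfalso
      have hx : x ∈ s := by simpa using hc
      have he : PySem.Set.add s x = s := by simp [PySem.Set.add, hx]
      rw [he] at h
      have := pv_len_le xs s
      simp at h; omega
    · have hx : x ∉ s := by simpa using hc
      have he : PySem.Set.add s x = s ++ [x] := by simp [PySem.Set.add, hx]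
      rw [he] at h
      have hh : (List.foldl PySem.Set.add (s ++ [x]) xs).length = (s ++ [x]).length + xs.length := by
        simp at h ⊢; omega
      obtain ⟨hnd, hnotin⟩ := ih (s ++ [x]) hh
      have hxnot : x ∉ xs := fun hx => (hnotin x hx) (by simp)
      refine ⟨List.nodup_cons.mpr ⟨hxnot, hnd⟩, ?_⟩
      intro y hy
      rcases List.mem_cons.mp hy with rfl | hy'
      · intro hmem
        have : s.contains y = true := by
          simpa using hmem
        exact hc this
      · intro hmem; exact (hnotin y hy') (by simp [hmem])

-- ===== VERDICT (by name: the statement is the Claim_ definition above) =====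
theorem deduplicate_report_names_py_spec : Claim_equal_deduplicate_report_names_py := by
  intro xs _
  unfold Spec_deduplicate_report_names_py
  rw [deduplicate_report_names_py]
  by_cases h : (xs.length == (PySem.Dict.counter xs).size) = true
  · rw [if_pos h]
    have heq : xs.length = (PySem.Dict.counter xs).size := by simpa using h
    have hsz : (PySem.Dict.counter xs).size = (PySem.Set.ofList xs).length := by
      rw [← PySem.Dict.keys_counter xs]
      simp [PySem.Dict.size, PySem.Dict.keys]
    have hfold : (List.foldl PySem.Set.add PySem.Set.empty xs).length
        = (PySem.Set.empty : PySem.Set String).length + xs.length := by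
      have : (PySem.Set.ofList xs) = List.foldl PySem.Set.add PySem.Set.empty xs := rfl
      rw [← this]
      simp [PySem.Set.empty]
      omega
    have hnd : xs.Nodup := (pv_nodup xs PySem.Set.empty hfold).1
    exact (alt_of_nodup xs hnd).symm
  · rw [if_neg h]
    rw [PySem.List.pyRange_zero_natCast, List.foldl_map]
    show (List.foldl (fun st (j : Nat) => pvStep xs st (j : Int)) (xs, PySem.Dict.empty) (List.range xs.length)).1
        = deduplicate_report_names_py_alt xs
    rw [List.range_eq_range']
    rw [loop_inv xs xs.length 0 xs PySem.Dict.empty (by omega) rfl rfl (by intro s; simp [PySem.Dict.getD_empty])]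
    rw [alt_eq, List.range_eq_range']
    rfl
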